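-- pv_equiv track=rewrite | github.com/H999/GeneticCNN-torch | geneticCNN/Stage.py | get_nodes_connections
-- ===== SOURCE A (Python) =====
-- def get_nodes_connections(nodes, connections):
--     """
--     This def get number of nodes and binary code string
--
--     # Parameters
--     1. `*nodes` : int
--         - The number of nodes must be pass
--     2. `*connections` : str
--         - The connections between nodes
--         - The number of nodes must be pass
--
--     # Returns
--     - tuple
--         - `inputs` : list
--             - inputs connections between nodes
--         - `outputs` : list
--             - outputs connections between nodes
--         - `separated_connections` : list
--             - split binary code connections to encode of nodes
--     """
--
--     ctr = 0
--     idx = 0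
--
--     separated_connections = []
--     while idx + ctr < len(connections):
--         ctr += 1
--         separated_connections.append(connections[idx:idx + ctr])
--         idx += ctr
--
--     outputs = []
--     for node in range(nodes - 1):
--         node_outputs = []
--         for i, node_connections in enumerate(separated_connections[node:]):
--             if node_connections[node] == '1':
--                 node_outputs.append(node + i + 1)
--         outputs.append(node_outputs)
--     outputs.append([])
--
--     inputs = [[]]
--     for node in range(1, nodes):
--         node_inputs = []
--         for i, connection in enumerate(separated_connections[node - 1]):
--             if connection == '1':
--                 node_inputs.append(i)
--         inputs.append(node_inputs)
--     return inputs, outputs, separated_connections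
-- ===== SOURCE B (Python) =====
-- def get_nodes_connections(nodes, connections):
--     # same triangular chunking as before
--     ctr = 0
--     idx = 0
--     separated_connections = []
--     while idx + ctr < len(connections):
--         ctr += 1
--         separated_connections.append(connections[idx:idx + ctr])
--         idx += ctr
--
--     # ONE pass over all edges, indexing them by source and by target
--     ins = {}
--     outs = {}
--     for m, chunk in enumerate(separated_connections):
--         for p, c in enumerate(chunk):
--             if c == '1':
--                 ins.setdefault(m + 1, []).append(p)
--                 outs.setdefault(p, []).append(m + 1)
--
--     inputs = [[]] + [ins.get(m, []) for m in range(1, nodes)]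
--     outputs = [outs.get(p, []) for p in range(nodes - 1)] + [[]]
--     return inputs, outputs, separated_connections
-- ===== Notes on version B (the rewrite author's own statement) =====
-- stated objective: alternative
-- what changed: A's two differently-shaped nested scans (a column scan over sep[node:] per source node for outputs, then a row scan per target node for inputs) are replaced by a single pass over all chunk characters that indexes every edge into two dictionaries, from which the per-node lists are read off.
import Mathlib
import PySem

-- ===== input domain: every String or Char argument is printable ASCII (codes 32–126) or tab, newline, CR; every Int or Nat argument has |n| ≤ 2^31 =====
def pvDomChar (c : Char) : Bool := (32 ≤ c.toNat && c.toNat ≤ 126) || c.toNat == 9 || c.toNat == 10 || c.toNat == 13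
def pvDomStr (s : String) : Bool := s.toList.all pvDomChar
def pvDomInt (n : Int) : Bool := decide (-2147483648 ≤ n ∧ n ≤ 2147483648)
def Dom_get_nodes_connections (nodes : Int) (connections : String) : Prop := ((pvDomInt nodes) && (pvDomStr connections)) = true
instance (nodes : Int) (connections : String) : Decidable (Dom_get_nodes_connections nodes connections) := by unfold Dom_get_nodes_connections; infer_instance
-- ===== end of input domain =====

-- B replaces A's two differently-shaped scans (a column scan per source node for outputs, a row scan
-- per target node for inputs) by ONE pass over all edges that fills two dictionaries (objective: alternative).

-- ===== PORT A =====
-- the triangular-chunking while loop, identical in both Pythons (helper shared by both ports)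
-- fuel-style structural recursion (fuel only makes the loop total: one unit per iteration,
-- s.toList.length units always suffice since idx+ctr grows each iteration)
def chunkLoop (s : String) (ctr idx : Nat) (acc : List String) : Nat → List String
  | 0 => acc
  | gas + 1 =>
    if idx + ctr < s.toList.length then
      chunkLoop s (ctr + 1) (idx + ctr + 1)
        (acc ++ [PySem.Str.slice s (some (idx : Int)) (some ((idx : Int) + (ctr : Int) + 1))]) gas
    else acc

def get_nodes_connections (nodes : Int) (connections : String) : List (List Int) × List (List Int) × List String :=
  let sep := chunkLoop connections 0 0 [] connections.toList.length
  let outputs :=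
    (PySem.List.pyRange 0 (nodes - 1) 1).foldl
      (fun acc node =>
        acc ++ [(PySem.List.enumerate (PySem.List.slice sep (some node) none) 0).foldl
          -- 'node_connections[node]' is always in range (chunk node+i has node+i+1 chars), so '== some '1'' is exact
          (fun a ic => if PySem.Str.pyGet? ic.2 node == some '1' then a ++ [node + ic.1 + 1] else a) []])
      []
    ++ [([] : List Int)]
  let inputs :=
    (PySem.List.pyRange 1 nodes 1).foldl
      (fun acc node =>
        -- 'separated_connections[node - 1]' raises IndexError when out of range: Pre_ excludes that (.getD "" is never hit inside Pre_)
        acc ++ [(PySem.List.enumerate ((PySem.List.pyGet? sep (node - 1)).getD "").toList 0).foldl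
          (fun a ic => if ic.2 == '1' then a ++ [ic.1] else a) []])
      [([] : List Int)]
  (inputs, outputs, sep)

-- ===== PORT B =====
def get_nodes_connections_alt (nodes : Int) (connections : String) : List (List Int) × List (List Int) × List String :=
  let sep := chunkLoop connections 0 0 [] connections.toList.length
  -- one pass over all edges: ins.setdefault(m+1, []).append(p); outs.setdefault(p, []).append(m+1)
  let dicts :=
    (PySem.List.enumerate sep 0).foldl
      (fun (d : PySem.Dict Int (List Int) × PySem.Dict Int (List Int)) mc =>
        (PySem.List.enumerate mc.2.toList 0).foldl
          (fun d pc => if pc.2 == '1' then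
              (PySem.Dict.modify d.1 (mc.1 + 1) [] (fun v => v ++ [pc.1]),
               PySem.Dict.modify d.2 pc.1 [] (fun v => v ++ [mc.1 + 1]))
            else d) d)
      (PySem.Dict.empty, PySem.Dict.empty)
  let inputs := [([] : List Int)] ++ (PySem.List.pyRange 1 nodes 1).map (fun m => PySem.Dict.getD dicts.1 m [])
  let outputs := (PySem.List.pyRange 0 (nodes - 1) 1).map (fun p => PySem.Dict.getD dicts.2 p []) ++ [([] : List Int)]
  (inputs, outputs, sep)

-- ===== PRECONDITION & SPEC =====
-- Pre_ excludes exactly the inputs where A raises IndexError (inputs loop reads a missing triangular chunk):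
-- A returns normally iff nodes ≤ 1 or the string holds the full triangle of nodes-1 chunks, (nodes-1)*nodes/2 chars.
def Pre_get_nodes_connections (nodes : Int) (connections : String) : Prop :=
  nodes ≤ 1 ∨ (nodes - 1) * nodes ≤ 2 * (connections.toList.length : Int)
instance (nodes : Int) (connections : String) : Decidable (Pre_get_nodes_connections nodes connections) := by unfold Pre_get_nodes_connections; infer_instance
def pvWitness_get_nodes_connections : Int × String := (3, "011")

def Spec_get_nodes_connections (nodes : Int) (connections : String) (out : List (List Int) × List (List Int) × List String) : Prop := out = get_nodes_connections_alt nodes connections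
instance (nodes : Int) (connections : String) (out : List (List Int) × List (List Int) × List String) : Decidable (Spec_get_nodes_connections nodes connections out) := by unfold Spec_get_nodes_connections; infer_instance

-- ===== CLAIM (what is proved, stated in full; the proofs are below) =====
def Claim_equal_get_nodes_connections : Prop := ∀ (nodes : Int) (connections : String), Dom_get_nodes_connections nodes connections → Pre_get_nodes_connections nodes connections → Spec_get_nodes_connections nodes connections (get_nodes_connections nodes connections)


-- ===== LEMMAS AND PROOFS =====

-- k-th triangular number
def tri : Nat → Nat
  | 0 => 0
  | k + 1 => tri k + k + 1

lemma tri_mono {a b : Nat} (h : a ≤ b) : tri a ≤ tri b := by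
  induction b with
  | zero => cases Nat.le_zero.mp h; rfl
  | succ n ih =>
    rcases Nat.lt_succ_iff_lt_or_eq.mp (Nat.lt_succ_of_le h) with h' | h'
    · exact le_trans (ih (by omega)) (by show tri n ≤ tri n + n + 1; omega)
    · cases h'; rfl

lemma two_tri (k : Nat) : 2 * tri k = k * (k + 1) := by
  induction k with
  | zero => rfl
  | succ n ih =>
    have : tri (n + 1) = tri n + n + 1 := rfl
    rw [this]
    nlinarith [ih]

-- every chunk the while loop produces is complete: chunk j has j+1 characters,
-- and there are at least n chunks whenever tri n ≤ len(connections)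
lemma chunkLoop_spec (s : String) (gas ctr idx : Nat) (acc : List String)
    (hgas : s.toList.length ≤ idx + ctr + gas)
    (hidx : idx = tri ctr) (hlen : acc.length = ctr)
    (hacc : ∀ j (hj : j < acc.length), (acc[j]).toList.length = j + 1) :
    (∀ j (hj : j < (chunkLoop s ctr idx acc gas).length), ((chunkLoop s ctr idx acc gas)[j]).toList.length = j + 1)
    ∧ (∀ n : Nat, tri n ≤ s.toList.length → n ≤ (chunkLoop s ctr idx acc gas).length) := by
  induction gas generalizing ctr idx acc with
  | zero =>
    refine ⟨hacc, fun n hn => ?_⟩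
    simp only [chunkLoop] at *
    by_contra hc
    have h1 : ctr + 1 ≤ n := by omega
    have h2 : tri (ctr + 1) ≤ tri n := tri_mono h1
    have h3 : tri (ctr + 1) = tri ctr + ctr + 1 := rfl
    omega
  | succ gas ih =>
    simp only [chunkLoop]
    by_cases h : idx + ctr < s.toList.length
    · simp only [h, if_true]
      have hslice : (PySem.Str.slice s (some (idx : Int)) (some ((idx : Int) + (ctr : Int) + 1))).toList.length = ctr + 1 := by
        rw [PySem.Str.toList_slice, PySem.Chars.slice_eq_listSlice]
        rw [PySem.List.slice_of_nonneg _ (by omega) (by omega) (by omega) (by omega)]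
        rw [List.length_take, List.length_drop]
        have h1 : ((idx : Int)).toNat = idx := by omega
        have h2 : ((idx : Int) + (ctr : Int) + 1).toNat = idx + ctr + 1 := by omega
        rw [h1, h2]
        omega
      refine ih (ctr + 1) (idx + ctr + 1) _ (by omega)
        (by have : tri (ctr + 1) = tri ctr + ctr + 1 := rfl; omega)
        (by simp [hlen]) ?_
      intro j hj
      simp only [List.length_append, List.length_cons, List.length_nil, hlen] at hj
      rcases Nat.lt_or_ge j ctr with hlt | hge
      · rw [List.getElem_append_left (by omega)]
        exact hacc j (by omega)
      · have hj' : j = ctr := by omega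
        subst hj'
        rw [List.getElem_append_right (by omega)]
        simpa [hlen] using hslice
    · simp only [h, if_false]
      refine ⟨hacc, fun n hn => ?_⟩
      by_contra hc
      have h1 : ctr + 1 ≤ n := by omega
      have h2 : tri (ctr + 1) ≤ tri n := tri_mono h1
      have h3 : tri (ctr + 1) = tri ctr + ctr + 1 := rfl
      omega

-- indices of the '1' characters, as produced by the row scan
def ones (cs : List Char) (s : Int) : List Int :=
  ((PySem.List.enumerate cs s).filter (fun pc => pc.2 == '1')).map (fun pc => pc.1)

lemma ones_cons (c : Char) (cs : List Char) (s : Int) :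
    ones (c :: cs) s = (if c == '1' then [s] else []) ++ ones cs (s + 1) := by
  by_cases hc : (c == '1') = true <;>
    simp [ones, PySem.List.enumerate_cons, hc]

-- contribution of the chunk list (starting at chunk index s) to ins key m / outs key p
def inC : List String → Int → Int → List Int
  | [], _, _ => []
  | c :: t, s, m => (if m = s + 1 then ones c.toList 0 else []) ++ inC t (s + 1) m

def outC : List String → Int → Int → List Int
  | [], _, _ => []
  | c :: t, s, p => (if PySem.List.pyGet? c.toList p = some '1' then [s + 1] else []) ++ outC t (s + 1) p

lemma enumerate_shift {α : Type} (xs : List α) (s : Int) :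
    PySem.List.enumerate xs s = (PySem.List.enumerate xs 0).map (fun q => (s + q.1, q.2)) := by
  rw [PySem.List.enumerate_eq_zipIdx_map, PySem.List.enumerate_eq_zipIdx_map, List.map_map]
  exact List.map_congr_left (fun p _ => by simp)

lemma inner_spec (cs : List Char) (s t : Int) (d0 : PySem.Dict Int (List Int) × PySem.Dict Int (List Int)) :
    (∀ m : Int,
      (((PySem.List.enumerate cs s).foldl
        (fun d pc => if pc.2 == '1' then
            (PySem.Dict.modify d.1 t [] (fun v => v ++ [pc.1]),
             PySem.Dict.modify d.2 pc.1 [] (fun v => v ++ [t]))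
          else d) d0).1).getD m [] = d0.1.getD m [] ++ (if m = t then ones cs s else []))
    ∧ (∀ p : Int, 0 ≤ p →
      (((PySem.List.enumerate cs s).foldl
        (fun d pc => if pc.2 == '1' then
            (PySem.Dict.modify d.1 t [] (fun v => v ++ [pc.1]),
             PySem.Dict.modify d.2 pc.1 [] (fun v => v ++ [t]))
          else d) d0).2).getD p [] = d0.2.getD p [] ++ (if s ≤ p ∧ PySem.List.pyGet? cs (p - s) = some '1' then [t] else [])) := by
  induction cs generalizing s d0 with
  | nil =>
    refine ⟨fun m => ?_, fun p hp => ?_⟩ <;>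
      simp only [PySem.List.enumerate_nil, List.foldl_nil, ones, List.filter_nil,
        List.map_nil]
    · simp
    · have hnone : PySem.List.pyGet? ([] : List Char) (p - s) = none := by
        rw [PySem.List.pyGet?_eq_none_iff]
        simp [PySem.Raise.InRange]
      simp [hnone]
  | cons c cs ih =>
    simp only [PySem.List.enumerate_cons, List.foldl_cons]
    by_cases hc : (c == '1') = true
    · simp only [hc, if_true]
      obtain ⟨ihA, ihB⟩ := ih (s + 1)
        (PySem.Dict.modify d0.1 t [] (fun v => v ++ [s]),
         PySem.Dict.modify d0.2 s [] (fun v => v ++ [t]))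
      have hc' : c = '1' := by simpa using hc
      refine ⟨fun m => ?_, fun p hp => ?_⟩
      · rw [ihA m]
        by_cases hm : m = t
        · subst hm
          rw [PySem.Dict.getD_modify_self]
          simp [ones_cons, hc, List.append_assoc]
        · rw [PySem.Dict.getD_modify_of_ne _ _ _ hm]
          simp [hm]
      · rw [ihB p hp]
        by_cases hps : p = s
        · subst hps
          rw [PySem.Dict.getD_modify_self]
          simp [hc', show ¬(p + 1 ≤ p) by omega]
        · rw [PySem.Dict.getD_modify_of_ne _ _ _ hps]
          have hiff : (s + 1 ≤ p ∧ PySem.List.pyGet? cs (p - (s + 1)) = some '1')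
              ↔ (s ≤ p ∧ PySem.List.pyGet? (c :: cs) (p - s) = some '1') := by
            by_cases hsp : s + 1 ≤ p
            · rw [PySem.List.pyGet?_of_nonneg _ (by omega : (0:Int) ≤ p - (s + 1)),
                PySem.List.pyGet?_of_nonneg _ (by omega : (0:Int) ≤ p - s)]
              have e : (p - s).toNat = (p - (s + 1)).toNat + 1 := by omega
              rw [e, List.getElem?_cons_succ]
              constructor <;> rintro ⟨_, h2⟩ <;> exact ⟨by omega, h2⟩
            · have hnsp : ¬ s ≤ p := by omega
              simp [hsp, hnsp]
          rw [if_congr hiff rfl rfl]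
    · simp only [hc, Bool.false_eq_true, if_false]
      obtain ⟨ihA, ihB⟩ := ih (s + 1) d0
      have hc' : ¬ c = '1' := by simpa using hc
      refine ⟨fun m => ?_, fun p hp => ?_⟩
      · rw [ihA m]
        simp [ones_cons, hc]
      · rw [ihB p hp]
        have hiff : (s + 1 ≤ p ∧ PySem.List.pyGet? cs (p - (s + 1)) = some '1')
            ↔ (s ≤ p ∧ PySem.List.pyGet? (c :: cs) (p - s) = some '1') := by
          by_cases hps : p = s
          · subst hps
            simp [hc', show ¬(p + 1 ≤ p) by omega]
          · by_cases hsp : s + 1 ≤ p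
            · rw [PySem.List.pyGet?_of_nonneg _ (by omega : (0:Int) ≤ p - (s + 1)),
                PySem.List.pyGet?_of_nonneg _ (by omega : (0:Int) ≤ p - s)]
              have e : (p - s).toNat = (p - (s + 1)).toNat + 1 := by omega
              rw [e, List.getElem?_cons_succ]
              constructor <;> rintro ⟨_, h2⟩ <;> exact ⟨by omega, h2⟩
            · have hnsp : ¬ s ≤ p := by omega
              simp [hsp, hnsp]
        rw [if_congr hiff rfl rfl]

lemma outer_spec (l : List String) (s : Int) (d0 : PySem.Dict Int (List Int) × PySem.Dict Int (List Int)) :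
    (∀ m : Int,
      (((PySem.List.enumerate l s).foldl
        (fun (d : PySem.Dict Int (List Int) × PySem.Dict Int (List Int)) mc =>
          (PySem.List.enumerate mc.2.toList 0).foldl
            (fun d pc => if pc.2 == '1' then
                (PySem.Dict.modify d.1 (mc.1 + 1) [] (fun v => v ++ [pc.1]),
                 PySem.Dict.modify d.2 pc.1 [] (fun v => v ++ [mc.1 + 1]))
              else d) d) d0).1).getD m [] = d0.1.getD m [] ++ inC l s m)
    ∧ (∀ p : Int, 0 ≤ p →
      (((PySem.List.enumerate l s).foldl
        (fun (d : PySem.Dict Int (List Int) × PySem.Dict Int (List Int)) mc =>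
          (PySem.List.enumerate mc.2.toList 0).foldl
            (fun d pc => if pc.2 == '1' then
                (PySem.Dict.modify d.1 (mc.1 + 1) [] (fun v => v ++ [pc.1]),
                 PySem.Dict.modify d.2 pc.1 [] (fun v => v ++ [mc.1 + 1]))
              else d) d) d0).2).getD p [] = d0.2.getD p [] ++ outC l s p) := by
  induction l generalizing s d0 with
  | nil =>
    refine ⟨fun m => ?_, fun p hp => ?_⟩ <;>
      simp [PySem.List.enumerate_nil, inC, outC]
  | cons c tl ihl =>
    simp only [PySem.List.enumerate_cons, List.foldl_cons]
    obtain ⟨hA, hB⟩ := inner_spec c.toList 0 (s + 1) d0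
    refine ⟨fun m => ?_, fun p hp => ?_⟩
    · rw [(ihl (s + 1) _).1 m, hA m]
      simp [inC, List.append_assoc]
    · rw [(ihl (s + 1) _).2 p hp, hB p hp]
      simp [outC, hp, List.append_assoc]

lemma inC_of_le (l : List String) : ∀ (s m : Int), m ≤ s → inC l s m = [] := by
  induction l with
  | nil => intro s m h; rfl
  | cons c tl ih =>
    intro s m h
    simp [inC, show m ≠ s + 1 by omega, ih (s + 1) m (by omega)]

lemma inC_at (l : List String) : ∀ (s m : Int) (c : String),
    PySem.List.pyGet? l (m - s - 1) = some c → s < m →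
    inC l s m = ones c.toList 0 := by
  induction l with
  | nil =>
    intro s m c hget hlt
    rw [show PySem.List.pyGet? ([] : List String) (m - s - 1) = none by
      rw [PySem.List.pyGet?_eq_none_iff]; simp [PySem.Raise.InRange]] at hget
    cases hget
  | cons x tl ih =>
    intro s m c hget hlt
    by_cases hm : m = s + 1
    · subst hm
      rw [show s + 1 - s - 1 = (0 : Int) by omega, PySem.List.pyGet?_zero_cons] at hget
      cases hget
      simp [inC, inC_of_le tl (s + 1) (s + 1) le_rfl]
    · have h2 : s + 2 ≤ m := by omega
      rw [PySem.List.pyGet?_of_nonneg _ (by omega : (0:Int) ≤ m - s - 1),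
        show (m - s - 1).toNat = (m - (s + 1) - 1).toNat + 1 by omega,
        List.getElem?_cons_succ,
        ← PySem.List.pyGet?_of_nonneg _ (by omega : (0:Int) ≤ m - (s + 1) - 1)] at hget
      simp [inC, hm, ih (s + 1) m c hget (by omega)]

lemma outC_eq (l : List String) : ∀ (s p : Int),
    outC l s p = ((PySem.List.enumerate l s).filter
        (fun mc => PySem.List.pyGet? mc.2.toList p == some '1')).map (fun mc => mc.1 + 1) := by
  induction l with
  | nil => intro s p; simp [outC, PySem.List.enumerate_nil]
  | cons c tl ih =>
    intro s p
    rw [outC, PySem.List.enumerate_cons, List.filter_cons]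
    by_cases h : PySem.List.pyGet? c.toList p = some '1'
    · simp [h, ih (s + 1) p]
    · simp [h, ih (s + 1) p]

-- the column scan of A over sep[node:] equals the edge-indexed collection over all of sep
lemma outPart (sep : List String) (node : Int) (h0 : 0 ≤ node) (hn : node < (sep.length : Int))
    (hlen : ∀ j (hj : j < sep.length), (sep[j]).toList.length = j + 1) :
    ((PySem.List.enumerate sep 0).filter
        (fun mc => PySem.List.pyGet? mc.2.toList node == some '1')).map (fun mc => mc.1 + 1)
    = ((PySem.List.enumerate (PySem.List.slice sep (some node) none) 0).filter
        (fun ic => PySem.List.pyGet? ic.2.toList node == some '1')).map (fun ic => node + ic.1 + 1) := by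
  rw [PySem.List.slice_from _ h0]
  have hcast : (node.toNat : Int) = node := Int.toNat_of_nonneg h0
  conv_lhs => rw [← List.take_append_drop node.toNat sep]
  rw [PySem.List.enumerate_append, List.filter_append, List.map_append]
  have h1 : ((PySem.List.enumerate (List.take node.toNat sep) 0).filter
      (fun mc => PySem.List.pyGet? mc.2.toList node == some '1')) = [] := by
    rw [List.filter_eq_nil_iff]
    intro mc hmc
    rw [PySem.List.mem_enumerate_iff] at hmc
    obtain ⟨k, hk, rfl⟩ := hmc
    have hk' : k < sep.length := by
      simp [List.length_take] at hk; omega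
    have hchunk := hlen k hk'
    have hnone : PySem.List.pyGet? (sep[k]).toList node = none := by
      rw [PySem.List.pyGet?_eq_none_iff]
      simp only [PySem.Raise.InRange]
      simp [List.length_take] at hk
      omega
    simp [List.getElem_take, hnone]
  rw [h1]
  simp only [List.map_nil, List.nil_append]
  have h2 : (0 : Int) + ((List.take node.toNat sep).length : Int) = (node.toNat : Int) := by
    simp [List.length_take]; omega
  rw [h2, enumerate_shift (sep.drop node.toNat) (node.toNat : Int), List.filter_map, List.map_map]
  rw [List.filter_congr (fun q _ => rfl :
    ∀ q ∈ PySem.List.enumerate (List.drop node.toNat sep) 0,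
      ((fun mc => PySem.List.pyGet? mc.2.toList node == some '1') ∘ (fun q => ((node.toNat : Int) + q.1, q.2))) q
        = (fun ic => PySem.List.pyGet? ic.2.toList node == some '1') q)]
  apply List.map_congr_left
  intro q _
  simp [hcast]

-- ===== VERDICT (by name: the statement is the Claim_ definition above) =====
theorem get_nodes_connections_spec : Claim_equal_get_nodes_connections := by
  intro nodes connections _ hpre
  unfold Spec_get_nodes_connections
  simp only [get_nodes_connections, get_nodes_connections_alt]
  obtain ⟨hlen, hcnt⟩ := chunkLoop_spec connections connections.toList.length 0 0 []
    (by omega) rfl rfl (by intro j hj; simp at hj)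
  set sep := chunkLoop connections 0 0 [] connections.toList.length with hsep
  have hN : 2 ≤ nodes → nodes - 1 ≤ (sep.length : Int) := by
    intro h2
    rcases hpre with h | h
    · omega
    · have h2t := two_tri (nodes - 1).toNat
      have hcast : ((nodes - 1).toNat : Int) = nodes - 1 := by omega
      have hnat : (nodes - 1).toNat * ((nodes - 1).toNat + 1) ≤ 2 * connections.toList.length := by
        have hint : (((nodes - 1).toNat : Int)) * (((nodes - 1).toNat : Int) + 1)
            ≤ 2 * (connections.toList.length : Int) := by
          rw [hcast, show nodes - 1 + 1 = nodes by omega]; exact h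
        exact_mod_cast hint
      have htri : 2 * tri (nodes - 1).toNat ≤ 2 * connections.toList.length := by
        rw [h2t]; exact hnat
      have := hcnt (nodes - 1).toNat (by omega)
      omega
  obtain ⟨hIns, hOuts⟩ := outer_spec sep 0 (PySem.Dict.empty, PySem.Dict.empty)
  have hempty : ∀ z : Int, (PySem.Dict.empty : PySem.Dict Int (List Int)).getD z [] = [] :=
    fun z => rfl
  refine Prod.ext ?_ (Prod.ext ?_ rfl)
  -- inputs
  · show (PySem.List.pyRange 1 nodes 1).foldl _ [([] : List Int)] = _
    rw [PySem.List.foldl_append_singleton_eq_map]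
    refine congrArg _ (List.map_congr_left ?_)
    intro node hnode
    rw [PySem.List.mem_pyRange_one] at hnode
    have hlt : node - 1 < (sep.length : Int) := by
      have := hN (by omega); omega
    have hget : PySem.List.pyGet? sep (node - 1) = some sep[(node - 1).toNat] :=
      PySem.List.pyGet?_eq_some_getElem sep (by omega) (by omega)
    rw [hIns node, hempty, List.nil_append,
      inC_at sep 0 node sep[(node - 1).toNat]
        (by rw [show node - 0 - 1 = node - 1 by omega]; exact hget) (by omega)]
    rw [hget]
    simp only [Option.getD_some]
    rw [PySem.List.foldl_append_if]
    rfl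
  -- outputs
  · show (PySem.List.pyRange 0 (nodes - 1) 1).foldl _ [] ++ [([] : List Int)] = _
    rw [PySem.List.foldl_append_singleton_eq_map, List.nil_append]
    refine congrArg (· ++ [([] : List Int)]) (List.map_congr_left ?_)
    intro node hnode
    rw [PySem.List.mem_pyRange_one] at hnode
    have hlt : node < (sep.length : Int) := by
      have := hN (by omega); omega
    rw [hOuts node (by omega), hempty, List.nil_append, outC_eq sep 0 node]
    rw [PySem.List.foldl_append_if, List.nil_append]
    simp only [PySem.Str.pyGet?_eq, PySem.Chars.pyGet?_eq_listPyGet?]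
    exact (outPart sep node (by omega) hlt hlen).symm
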